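-- pv_equiv track=rewrite | github.com/AdamVenis/sapai | pets.py | cumulative_dict
-- ===== SOURCE A (Python) =====
-- import collections
--
-- def cumulative_dict(source):
--     result = collections.defaultdict(list)
--     keys = sorted(source.keys())
--     for tier in keys:
--         for i in keys:
--             if i > tier:
--                 break
--             result[tier].extend(source[i])
--     return result
-- ===== SOURCE B (Python) =====
-- import collections
--
-- def cumulative_dict(source):
--     result = collections.defaultdict(list)
--     acc = []
--     for key in sorted(source.keys()):
--         acc = acc + source[key]
--         result[key] = acc
--     return result
-- ===== Notes on version B (the rewrite author's own statement) =====
-- stated objective: alternative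
-- what changed: Replaces the nested inner re-scan of all prior sorted keys by a single pass over the sorted keys carrying one running prefix-accumulator list that is assigned per key.
import Mathlib
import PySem

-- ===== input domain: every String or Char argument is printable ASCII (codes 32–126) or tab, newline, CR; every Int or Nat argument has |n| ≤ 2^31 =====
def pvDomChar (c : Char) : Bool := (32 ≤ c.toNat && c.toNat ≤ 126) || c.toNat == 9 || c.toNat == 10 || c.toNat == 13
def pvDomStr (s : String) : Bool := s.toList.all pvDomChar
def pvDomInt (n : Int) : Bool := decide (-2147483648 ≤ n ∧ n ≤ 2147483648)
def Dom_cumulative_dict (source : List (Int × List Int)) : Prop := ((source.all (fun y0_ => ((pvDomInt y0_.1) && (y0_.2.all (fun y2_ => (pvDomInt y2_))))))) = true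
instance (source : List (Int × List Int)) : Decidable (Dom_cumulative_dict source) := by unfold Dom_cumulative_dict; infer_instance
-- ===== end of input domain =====

-- B replaces A's nested re-scan of all prior sorted keys by one pass carrying a
-- running prefix-accumulator list (same output size and cost; different decomposition).

-- ===== PORT A =====
-- inner loop 'for i in keys: if i > tier: break; result[tier].extend(source[i])'
-- (result is a defaultdict(list): result[tier].extend(v) is modify tier [] (· ++ v))
def cdInner (src : PySem.Dict Int (List Int)) (tier : Int) :
    List Int → PySem.Dict Int (List Int) → PySem.Dict Int (List Int)
  | [], r => r
  | i :: rest, r =>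
    if tier < i then r
    else cdInner src tier rest (r.modify tier [] (fun v => v ++ src.getD i []))

def cumulative_dict (source : List (Int × List Int)) : List (Int × List Int) :=
  let src := PySem.Dict.ofList source
  let keys := PySem.List.sorted src.keys (fun k => k) false
  (keys.foldl (fun r tier => cdInner src tier keys r) PySem.Dict.empty).items

-- ===== PORT B =====
def cumulative_dict_alt (source : List (Int × List Int)) : List (Int × List Int) :=
  let src := PySem.Dict.ofList source
  ((PySem.List.sorted src.keys (fun k => k) false).foldl
      (fun (p : List Int × PySem.Dict Int (List Int)) k =>
        let acc := p.1 ++ src.getD k []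
        (acc, p.2.insert k acc))
      ([], PySem.Dict.empty)).2.items

-- ===== PRECONDITION & SPEC =====
def Spec_cumulative_dict (source : List (Int × List Int)) (out : List (Int × List Int)) : Prop := out = cumulative_dict_alt source
instance (source : List (Int × List Int)) (out : List (Int × List Int)) : Decidable (Spec_cumulative_dict source out) := by unfold Spec_cumulative_dict; infer_instance

-- ===== CLAIM (what is proved, stated in full; the proofs are below) =====
def Claim_equal_cumulative_dict : Prop := ∀ (source : List (Int × List Int)), Dom_cumulative_dict source → Spec_cumulative_dict source (cumulative_dict source)

-- ===== LEMMAS AND PROOFS =====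

-- concatenation of source values over the keys of ks that are ≤ tier (a leading
-- prefix of ks, since ks is sorted): what A's inner loop appends to result[tier]
def cdCB (src : PySem.Dict Int (List Int)) (tier : Int) (ks : List Int) : List Int :=
  ((ks.takeWhile (fun i => decide (i ≤ tier))).map (fun i => src.getD i [])).flatten

-- A's inner loop with break = a fold over the takeWhile prefix
lemma cdInner_eq_foldl (src : PySem.Dict Int (List Int)) (tier : Int) :
    ∀ (ks : List Int) (r : PySem.Dict Int (List Int)),
      cdInner src tier ks r =
        (ks.takeWhile (fun i => decide (i ≤ tier))).foldl
          (fun r i => r.modify tier [] (fun v => v ++ src.getD i [])) r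
  | [], r => rfl
  | i :: rest, r => by
    by_cases h : tier < i
    · simp [cdInner, h, show ¬ i ≤ tier by omega]
    · simp only [cdInner, if_neg h, List.takeWhile_cons,
        show (decide (i ≤ tier)) = true by simp; omega, List.foldl_cons,
        if_true]
      exact cdInner_eq_foldl src tier rest _

-- a nonempty run of extends at one key collapses to a single insert
lemma foldl_modify_collapse (src : PySem.Dict Int (List Int)) (tier : Int) :
    ∀ (l : List Int) (r : PySem.Dict Int (List Int)), l ≠ [] →
      l.foldl (fun r i => r.modify tier [] (fun v => v ++ src.getD i [])) r =
        r.insert tier (r.getD tier [] ++ (l.map (fun i => src.getD i [])).flatten)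
  | [], _, h => absurd rfl h
  | [i], r, _ => by simp [PySem.Dict.modify]
  | i :: j :: rest, r, _ => by
    have ih := foldl_modify_collapse src tier (j :: rest)
      (r.modify tier [] (fun v => v ++ src.getD i [])) (by simp)
    simp only [List.foldl_cons] at ih ⊢
    rw [ih]
    simp [PySem.Dict.modify, PySem.Dict.getD_insert_self, PySem.Dict.insert_insert_self]

-- lockstep induction: A's outer fold (in collapsed form, with acc the concatenation of
-- the values of the already-processed keys) equals B's prefix-accumulating fold
lemma cd_main (src : PySem.Dict Int (List Int)) :
    ∀ (ks : List Int), ks.Pairwise (· < ·) →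
    ∀ (acc : List Int) (r : PySem.Dict Int (List Int)),
      (∀ t ∈ ks, r.contains t = false) →
      ks.foldl (fun r tier => r.insert tier (r.getD tier [] ++ (acc ++ cdCB src tier ks))) r
        = (ks.foldl (fun (p : List Int × PySem.Dict Int (List Int)) k =>
              let a := p.1 ++ src.getD k []
              (a, p.2.insert k a)) (acc, r)).2
  | [], _, acc, r, _ => rfl
  | k :: rest, hpw, acc, r, hfresh => by
    have hklt : ∀ t ∈ rest, k < t := fun t ht => (List.pairwise_cons.mp hpw).1 t ht
    have hpw' : rest.Pairwise (· < ·) := (List.pairwise_cons.mp hpw).2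
    have hCBk : cdCB src k (k :: rest) = src.getD k [] := by
      cases rest with
      | nil => simp [cdCB]
      | cons j js =>
        have : ¬ j ≤ k := by have := hklt j (by simp); omega
        simp [cdCB, this]
    have hgk : r.getD k [] = [] := PySem.Dict.getD_of_not_contains r [] (hfresh k (by simp))
    simp only [List.foldl_cons, hCBk, hgk, List.nil_append]
    have hcong : ∀ (r' : PySem.Dict Int (List Int)), ∀ t ∈ rest,
        r'.insert t (r'.getD t [] ++ (acc ++ cdCB src t (k :: rest)))
          = r'.insert t (r'.getD t [] ++ ((acc ++ src.getD k []) ++ cdCB src t rest)) := by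
      intro r' t ht
      have hle : (decide (k ≤ t)) = true := by simp; exact le_of_lt (hklt t ht)
      simp [cdCB, hle, List.append_assoc]
    rw [PySem.List.foldl_congr_mem rest _ _ _ hcong]
    have hfresh' : ∀ t ∈ rest, (r.insert k (acc ++ src.getD k [])).contains t = false := by
      intro t ht
      rw [PySem.Dict.contains_insert]
      have : (t == k) = false := by simp; exact ne_of_gt (hklt t ht)
      simp [this, hfresh t (by simp [ht])]
    exact cd_main src rest hpw' (acc ++ src.getD k []) _ hfresh'

-- the sorted distinct keys are strictly increasing
lemma sorted_keys_pairwise_lt (src : PySem.Dict Int (List Int)) (hnd0 : src.keys.Nodup) :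
    (PySem.List.sorted src.keys (fun k => k) false).Pairwise (· < ·) := by
  have hle := PySem.List.sorted_pairwise src.keys (fun k => k)
  have hnd : (PySem.List.sorted src.keys (fun k => k) false).Nodup :=
    ((PySem.List.sorted_perm src.keys (fun k => k) false).nodup_iff).mpr hnd0
  exact (hle.and hnd).imp (fun h => lt_of_le_of_ne h.1 h.2)

-- both ports compute the same dict from the source dict
lemma cd_top (src : PySem.Dict Int (List Int)) (hnd0 : src.keys.Nodup) :
    ((PySem.List.sorted src.keys (fun k => k) false).foldl
        (fun r tier => cdInner src tier (PySem.List.sorted src.keys (fun k => k) false) r)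
        PySem.Dict.empty).items
      = ((PySem.List.sorted src.keys (fun k => k) false).foldl
          (fun (p : List Int × PySem.Dict Int (List Int)) k =>
            let a := p.1 ++ src.getD k []
            (a, p.2.insert k a)) ([], PySem.Dict.empty)).2.items := by
  set keys := PySem.List.sorted src.keys (fun k => k) false with hkeys
  have hpw := sorted_keys_pairwise_lt src hnd0
  have hbody : ∀ (r : PySem.Dict Int (List Int)), ∀ tier ∈ keys,
      cdInner src tier keys r
        = r.insert tier (r.getD tier [] ++ ([] ++ cdCB src tier keys)) := by
    intro r tier htier
    rw [cdInner_eq_foldl]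
    have hne : keys.takeWhile (fun i => decide (i ≤ tier)) ≠ [] := by
      cases hk : keys with
      | nil => rw [hk] at htier; simp at htier
      | cons m t =>
        have htier' : tier ∈ src.keys :=
          (PySem.List.mem_sorted src.keys (fun k => k) false tier).mp htier
        have hm : m ≤ tier :=
          PySem.List.key_head_sorted_le src.keys (fun k => k)
            (hkeys.symm.trans hk) tier htier'
        simp [hm]
    rw [foldl_modify_collapse src tier _ r hne]
    simp [cdCB]
  rw [PySem.List.foldl_congr_mem keys _ _ _ hbody]
  exact congrArg PySem.Dict.items
    (cd_main src keys (hkeys ▸ hpw) [] PySem.Dict.empty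
      (fun t _ => PySem.Dict.contains_empty t))

-- ===== VERDICT (by name: the statement is the Claim_ definition above) =====
theorem cumulative_dict_spec : Claim_equal_cumulative_dict := by
  intro source _
  exact cd_top (PySem.Dict.ofList source) (PySem.Dict.nodup_keys_ofList source)
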